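-- pv_equiv track=rewrite | github.com/chhavijeiff/Sort-Visualizer | quicksort.py | colorArray
-- ===== SOURCE A (Python) =====
-- def colorArray(dataLen, head, tail, border, currIdx, isSwapping=False):
--     colorArray = []
--     for i in range(dataLen):
--         # Base coloring
--         if i >= head and i <= tail:
--             colorArray.append('gray')
--         else:
--             colorArray.append('white')
--
--         if i == tail:
--             colorArray[i] = 'orange'
--         elif i == border:
--             colorArray[i] = 'red'
--         elif i == currIdx:
--             colorArray[i] = 'yellow'
--
--         if isSwapping:
--             if i == border or i == currIdx:
--                 colorArray[i] = 'green'
--     return colorArray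
-- ===== SOURCE B (Python) =====
-- def colorArray(dataLen, head, tail, border, currIdx, isSwapping=False):
--     colors = ['gray' if head <= i <= tail else 'white' for i in range(dataLen)]
--
--     def put(idx, c):
--         if 0 <= idx < dataLen:
--             colors[idx] = c
--
--     if isSwapping:
--         put(tail, 'orange')
--         put(border, 'green')
--         put(currIdx, 'green')
--     else:
--         put(currIdx, 'yellow')
--         put(border, 'red')
--         put(tail, 'orange')
--     return colors
-- ===== Notes on version B (the rewrite author's own statement) =====
-- stated objective: simpler
-- what changed: Replaces A's per-index cascade of equality tests inside the loop by one base-color comprehension plus three range-guarded direct writes whose write order encodes the priority (orange>red>yellow; green override when swapping).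
import Mathlib
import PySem

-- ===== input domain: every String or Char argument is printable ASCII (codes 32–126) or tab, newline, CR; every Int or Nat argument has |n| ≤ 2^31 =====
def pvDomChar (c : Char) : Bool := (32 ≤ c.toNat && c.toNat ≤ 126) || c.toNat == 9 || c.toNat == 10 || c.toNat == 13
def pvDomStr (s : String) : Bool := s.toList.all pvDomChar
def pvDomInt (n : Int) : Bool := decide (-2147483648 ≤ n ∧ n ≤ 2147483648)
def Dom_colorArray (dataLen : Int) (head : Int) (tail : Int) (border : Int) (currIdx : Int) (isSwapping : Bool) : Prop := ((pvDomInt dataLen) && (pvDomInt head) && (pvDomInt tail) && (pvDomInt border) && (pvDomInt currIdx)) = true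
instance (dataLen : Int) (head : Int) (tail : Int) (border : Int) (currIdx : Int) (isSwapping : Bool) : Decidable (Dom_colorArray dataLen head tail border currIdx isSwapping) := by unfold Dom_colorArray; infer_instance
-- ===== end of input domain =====

-- B replaces A's per-index equality-test cascade by a base-color pass plus three
-- range-guarded direct writes whose order encodes the priority (objective: simpler).

-- ===== PORT A =====
-- Per-iteration: append base color, then the elif chain of index assignments, then
-- the swapping override.  In Python, i comes from range(dataLen) so 0 ≤ i < len(acc)
-- after the append and colorArray[i] = c is exactly List.set i.toNat c (no negative
-- index wraparound is reachable).
def colorArray (dataLen : Int) (head : Int) (tail : Int) (border : Int) (currIdx : Int) (isSwapping : Bool) : List String :=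
  (PySem.List.pyRange 0 dataLen 1).foldl (fun acc i =>
    let acc := acc ++ [if head ≤ i ∧ i ≤ tail then "gray" else "white"]
    let acc :=
      if i = tail then acc.set i.toNat "orange"
      else if i = border then acc.set i.toNat "red"
      else if i = currIdx then acc.set i.toNat "yellow"
      else acc
    if isSwapping then
      (if i = border ∨ i = currIdx then acc.set i.toNat "green" else acc)
    else acc) []

-- ===== PORT B =====
-- colors[idx] = c guarded by 0 <= idx < dataLen (Source B's `put`)
def pvPut (dataLen : Int) (xs : List String) (idx : Int) (c : String) : List String :=
  if 0 ≤ idx ∧ idx < dataLen then xs.set idx.toNat c else xs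

def colorArray_alt (dataLen : Int) (head : Int) (tail : Int) (border : Int) (currIdx : Int) (isSwapping : Bool) : List String :=
  let colors := (PySem.List.pyRange 0 dataLen 1).map (fun i => if head ≤ i ∧ i ≤ tail then "gray" else "white")
  if isSwapping then
    pvPut dataLen (pvPut dataLen (pvPut dataLen colors tail "orange") border "green") currIdx "green"
  else
    pvPut dataLen (pvPut dataLen (pvPut dataLen colors currIdx "yellow") border "red") tail "orange"

-- ===== PRECONDITION & SPEC =====
def Spec_colorArray (dataLen : Int) (head : Int) (tail : Int) (border : Int) (currIdx : Int) (isSwapping : Bool) (out : List String) : Prop := out = colorArray_alt dataLen head tail border currIdx isSwapping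
instance (dataLen : Int) (head : Int) (tail : Int) (border : Int) (currIdx : Int) (isSwapping : Bool) (out : List String) : Decidable (Spec_colorArray dataLen head tail border currIdx isSwapping out) := by unfold Spec_colorArray; infer_instance

-- ===== CLAIM (what is proved, stated in full; the proofs are below) =====
def Claim_equal_colorArray : Prop := ∀ (dataLen : Int) (head : Int) (tail : Int) (border : Int) (currIdx : Int) (isSwapping : Bool), Dom_colorArray dataLen head tail border currIdx isSwapping → Spec_colorArray dataLen head tail border currIdx isSwapping (colorArray dataLen head tail border currIdx isSwapping)

-- ===== LEMMAS AND PROOFS =====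

-- the final color of index i, common characterisation of both programs
def pvColor (head tail border currIdx : Int) (isSwapping : Bool) (i : Int) : String :=
  if isSwapping ∧ (i = border ∨ i = currIdx) then "green"
  else if i = tail then "orange"
  else if i = border then "red"
  else if i = currIdx then "yellow"
  else if head ≤ i ∧ i ≤ tail then "gray" else "white"

theorem pvA_loop (head tail border currIdx : Int) (isSwapping : Bool) (n : Nat) :
    (PySem.List.pyRange 0 (n : Int) 1).foldl (fun acc i =>
      let acc := acc ++ [if head ≤ i ∧ i ≤ tail then "gray" else "white"]
      let acc :=
        if i = tail then acc.set i.toNat "orange"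
        else if i = border then acc.set i.toNat "red"
        else if i = currIdx then acc.set i.toNat "yellow"
        else acc
      if isSwapping then
        (if i = border ∨ i = currIdx then acc.set i.toNat "green" else acc)
      else acc) []
      = (PySem.List.pyRange 0 (n : Int) 1).map (pvColor head tail border currIdx isSwapping) := by
  induction n with
  | zero => rfl
  | succ m ih =>
    have hsplit : PySem.List.pyRange 0 ((m + 1 : Nat) : Int) 1
        = PySem.List.pyRange 0 (m : Int) 1 ++ [(m : Int)] := by
      have := PySem.List.pyRange_one_succ_right (a := 0) (b := (m : Int)) (by omega)
      rw [← this]; norm_num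
    rw [hsplit, List.foldl_append, List.map_append, ih, List.foldl_cons, List.foldl_nil,
        List.map_cons, List.map_nil]
    clear ih hsplit
    generalize hG : List.map (pvColor head tail border currIdx isSwapping)
        (PySem.List.pyRange 0 (m : Int) 1) = L
    have hl : ((m : Int)).toNat = L.length := by
      rw [← hG]; simp [PySem.List.length_pyRange_one]
    simp only [hl]
    clear hG hl
    split_ifs <;> simp_all [pvColor]

theorem pvA_eq_map (dataLen head tail border currIdx : Int) (isSwapping : Bool) :
    colorArray dataLen head tail border currIdx isSwapping
      = (PySem.List.pyRange 0 dataLen 1).map (pvColor head tail border currIdx isSwapping) := by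
  unfold colorArray
  by_cases h : dataLen ≤ 0
  · rw [PySem.List.pyRange_one_eq_nil h]; rfl
  · obtain ⟨n, rfl⟩ : ∃ n : Nat, dataLen = (n : Int) := ⟨dataLen.toNat, by omega⟩
    exact pvA_loop head tail border currIdx isSwapping n

theorem pvPut_map (dataLen : Int) (f : Int → String) (idx : Int) (c : String) :
    pvPut dataLen ((PySem.List.pyRange 0 dataLen 1).map f) idx c
      = (PySem.List.pyRange 0 dataLen 1).map (fun i => if i = idx then c else f i) := by
  unfold pvPut
  split_ifs with h
  · apply List.ext_getElem
    · simp
    · intro k h1 h2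
      simp only [List.length_set, List.length_map, PySem.List.length_pyRange_one] at h1
      rw [List.getElem_set, List.getElem_map, List.getElem_map,
        PySem.List.getElem_pyRange_one]
      by_cases hk : idx.toNat = k
      · have : (0 : Int) + (k : Int) = idx := by omega
        simp [hk, this]
      · have hne : ¬ ((k : Int) = idx) := by omega
        simp [hk, hne]
  · apply (List.map_congr_left _).symm
    intro i hi
    rw [PySem.List.mem_pyRange_one] at hi
    have : i ≠ idx := by omega
    simp [this]

theorem pvB_eq_map (dataLen head tail border currIdx : Int) (isSwapping : Bool) :
    colorArray_alt dataLen head tail border currIdx isSwapping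
      = (PySem.List.pyRange 0 dataLen 1).map (pvColor head tail border currIdx isSwapping) := by
  unfold colorArray_alt
  cases isSwapping <;>
    simp only [if_true, if_false, Bool.false_eq_true, pvPut_map] <;>
    · apply List.map_congr_left
      intro i _
      simp only [pvColor]
      split_ifs <;> simp_all

-- ===== VERDICT (by name: the statement is the Claim_ definition above) =====
theorem colorArray_spec : Claim_equal_colorArray := by
  intro dataLen head tail border currIdx isSwapping _
  unfold Spec_colorArray
  rw [pvA_eq_map, pvB_eq_map]
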